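-- pv_equiv track=rewrite | github.com/zhenfelix/OnlineJudgeCodings | LeetCode/828. Count Unique Characters of All Substrings of a Given String/solution.py | uniqueLetterString
-- ===== SOURCE A (Python) =====
-- def uniqueLetterString(s: str) -> int:
--     n = len(s)
--     mp = [[-1] for _ in range(26)]
--     for i, ch in enumerate(s):
--         ch = ord(ch)-ord('A')
--         mp[ch].append(i)
--     ans = 0
--     for i in range(26):
--         mp[i].append(n)
--         m = len(mp[i])
--         for j in range(1,m-1):
--             ans += (mp[i][j]-mp[i][j-1])*(mp[i][j+1]-mp[i][j])
--     return ans
-- ===== SOURCE B (Python) =====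
-- def uniqueLetterString(s: str) -> int:
--     n = len(s)
--     last = [-1] * 26
--     second = [-1] * 26
--     ans = 0
--     for i, ch in enumerate(s):
--         c = ord(ch) - ord('A')
--         ans += (last[c] - second[c]) * (i - last[c])
--         second[c] = last[c]
--         last[c] = i
--     for c in range(26):
--         ans += (last[c] - second[c]) * (n - last[c])
--     return ans
-- ===== Notes on version B (the rewrite author's own statement) =====
-- stated objective: alternative
-- what changed: Single pass that keeps only the last two occurrence indices per letter and finalizes each occurrence's contribution on the fly (plus a constant 26-letter flush), instead of building full per-letter position lists and re-scanning each list with an indexed inner loop.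
import Mathlib
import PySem

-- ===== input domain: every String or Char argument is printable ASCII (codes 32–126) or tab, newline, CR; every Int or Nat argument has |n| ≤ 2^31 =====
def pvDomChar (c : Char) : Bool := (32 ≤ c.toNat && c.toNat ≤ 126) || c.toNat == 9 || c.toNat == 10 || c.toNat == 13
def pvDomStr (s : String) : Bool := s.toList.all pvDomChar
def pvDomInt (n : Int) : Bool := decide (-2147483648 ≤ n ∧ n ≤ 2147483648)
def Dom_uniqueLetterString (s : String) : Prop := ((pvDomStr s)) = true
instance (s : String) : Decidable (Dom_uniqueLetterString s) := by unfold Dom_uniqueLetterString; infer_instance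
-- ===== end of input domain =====

-- B replaces A's per-letter position lists (built in one pass, then re-scanned with an
-- indexed inner loop) by a single pass keeping only the last two occurrence indexes per
-- letter, finalizing each occurrence's contribution on the fly; same O(n) cost, less state.


-- ===== PORT A =====
-- mp[ch] with ch = ord(ch)-ord('A'): Python's (possibly negative, wrapping) list index is
-- PySem.List.pyGetD/pySetD — exact whenever -26 ≤ ch < 26, i.e. on Pre_ (outside, Python raises IndexError).
def buildA (mp : List (List Int)) (p : Int × Char) : List (List Int) :=
  let ch : Int := (p.2.toNat : Int) - 65
  PySem.List.pySetD mp ch (PySem.List.pyGetD mp ch [] ++ [p.1])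

-- the inner 'for j in range(1, m-1)' loop of A (m = len(q) after appending n)
def innerA (q : List Int) (ans : Int) : Int :=
  (PySem.List.pyRange 1 (PySem.List.len q - 1) 1).foldl
    (fun a j =>
      a + (PySem.List.pyGetD q j 0 - PySem.List.pyGetD q (j - 1) 0) *
          (PySem.List.pyGetD q (j + 1) 0 - PySem.List.pyGetD q j 0)) ans

-- one iteration of A's 'for i in range(26)' loop; state = (mp, ans)
def outerA (n : Int) (st : List (List Int) × Int) (i : Int) : List (List Int) × Int :=
  let q := PySem.List.pyGetD st.1 i [] ++ [n]
  (PySem.List.pySetD st.1 i q, innerA q st.2)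

def uniqueLetterString (s : String) : Int :=
  let n : Int := PySem.Str.len s
  let mp := (PySem.List.enumerate s.toList).foldl buildA (List.replicate 26 [-1])
  ((PySem.List.pyRange 0 26 1).foldl (outerA n) (mp, 0)).2

-- ===== PORT B =====
-- state = (last, second, ans); the same wrapped Python index via pyGetD/pySetD as in A.
def stepB (st : List Int × List Int × Int) (p : Int × Char) : List Int × List Int × Int :=
  let c : Int := (p.2.toNat : Int) - 65
  let lastc := PySem.List.pyGetD st.1 c 0
  let secc := PySem.List.pyGetD st.2.1 c 0
  (PySem.List.pySetD st.1 c p.1,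
   PySem.List.pySetD st.2.1 c lastc,
   st.2.2 + (lastc - secc) * (p.1 - lastc))

-- one iteration of B's final 'for c in range(26)' flush loop
def flushB (n : Int) (st : List Int × List Int × Int) (ans : Int) (c : Int) : Int :=
  ans + (PySem.List.pyGetD st.1 c 0 - PySem.List.pyGetD st.2.1 c 0) *
        (n - PySem.List.pyGetD st.1 c 0)

def uniqueLetterString_alt (s : String) : Int :=
  let n : Int := PySem.Str.len s
  let st := (PySem.List.enumerate s.toList).foldl stepB
      (List.replicate 26 (-1), List.replicate 26 (-1), 0)
  (PySem.List.pyRange 0 26 1).foldl (flushB n st) st.2.2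

-- ===== PRECONDITION & SPEC =====
-- Pre_ excludes exactly the inputs on which both Pythons raise IndexError: a character with
-- code outside [39, 90] makes ord(ch)-ord('A') fall outside [-26, 26).
def Pre_uniqueLetterString (s : String) : Prop :=
  (s.toList.all (fun c => 39 ≤ c.toNat && c.toNat ≤ 90)) = true
instance (s : String) : Decidable (Pre_uniqueLetterString s) := by
  unfold Pre_uniqueLetterString; infer_instance
def pvWitness_uniqueLetterString : String := "BANANA"

def Spec_uniqueLetterString (s : String) (out : Int) : Prop := out = uniqueLetterString_alt s
instance (s : String) (out : Int) : Decidable (Spec_uniqueLetterString s out) := by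
  unfold Spec_uniqueLetterString; infer_instance

-- ===== CLAIM (what is proved, stated in full; the proofs are below) =====
def Claim_equal_uniqueLetterString : Prop :=
  ∀ (s : String), Dom_uniqueLetterString s → Pre_uniqueLetterString s →
    Spec_uniqueLetterString s (uniqueLetterString s)

-- ===== LEMMAS AND PROOFS =====

-- normalized bucket of a character = the list cell Python's (wrapping) index reaches; < 26 under Pre_
def bkt (c : Char) : Nat := if c.toNat < 65 then c.toNat - 39 else c.toNat - 65

-- the indexes (first components) of the pairs of `en` whose character lands in bucket k
def poss (k : Nat) (en : List (Int × Char)) : List Int :=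
  (en.filter (fun p => bkt p.2 == k)).map Prod.fst

-- sum of (b-a)*(c-b) over consecutive triples of a :: b :: l
def g (a b : Int) : List Int → Int
  | [] => 0
  | c :: t => (b - a) * (c - b) + g b c t

-- B's per-letter loop: pb second last ans positions
def pb (sec last ans : Int) : List Int → Int × Int × Int
  | [] => (sec, last, ans)
  | i :: t => pb last i (ans + (last - sec) * (i - last)) t

-- the per-letter value both programs compute for a letter with position list ps
def pbk (ps : List Int) : Int × Int × Int := pb (-1) (-1) 0 ps
def contrib (n : Int) (ps : List Int) : Int :=
  (pbk ps).2.2 + ((pbk ps).2.1 - (pbk ps).1) * (n - (pbk ps).2.1)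

lemma bkt_lt (c : Char) (h1 : 39 ≤ c.toNat) (h2 : c.toNat ≤ 90) : bkt c < 26 := by
  unfold bkt; split <;> omega

lemma poss_cons (k : Nat) (p : Int × Char) (en : List (Int × Char)) :
    poss k (p :: en) = if bkt p.2 = k then p.1 :: poss k en else poss k en := by
  by_cases h : bkt p.2 = k <;> simp [poss, h]

lemma pb_fst : ∀ (ps : List Int) (a b x : Int), (pb a b x ps).1 = (pb a b 0 ps).1 := by
  intro ps
  induction ps with
  | nil => intro a b x; rfl
  | cons i t ih =>
    intro a b x
    simp only [pb]
    rw [ih b i (x + (b - a) * (i - b)), ih b i (0 + (b - a) * (i - b))]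

lemma pb_snd1 : ∀ (ps : List Int) (a b x : Int), (pb a b x ps).2.1 = (pb a b 0 ps).2.1 := by
  intro ps
  induction ps with
  | nil => intro a b x; rfl
  | cons i t ih =>
    intro a b x
    simp only [pb]
    rw [ih b i (x + (b - a) * (i - b)), ih b i (0 + (b - a) * (i - b))]

lemma pb_snd2 : ∀ (ps : List Int) (a b x : Int), (pb a b x ps).2.2 = x + (pb a b 0 ps).2.2 := by
  intro ps
  induction ps with
  | nil => intro a b x; simp [pb]
  | cons i t ih =>
    intro a b x
    simp only [pb]
    rw [ih b i (x + (b - a) * (i - b)), ih b i (0 + (b - a) * (i - b))]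
    ring

lemma pb_g (ps : List Int) (sec last ans n : Int) :
    (pb sec last ans ps).2.2 +
      ((pb sec last ans ps).2.1 - (pb sec last ans ps).1) * (n - (pb sec last ans ps).2.1) =
    ans + g sec last (ps ++ [n]) := by
  induction ps generalizing sec last ans with
  | nil => simp [pb, g]
  | cons i t ih =>
    simp only [pb, List.cons_append, g]
    rw [ih]; ring

lemma getD_set_eq {α : Type} (l : List α) (i k : Nat) (v d : α) (hi : i < l.length) :
    (l.set i v).getD k d = if k = i then v else l.getD k d := by
  by_cases h : k = i
  · subst h; simp [List.getD_eq_getElem?_getD, List.getElem?_set_self hi]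
  · simp [List.getD_eq_getElem?_getD, List.getElem?_set_ne (Ne.symm h), h]

lemma sum_map_ite_single (δ : Int) : ∀ (n j : Nat), j < n →
    ((List.range n).map (fun k => if k = j then δ else 0)).sum = δ := by
  intro n
  induction n with
  | zero => intro j h; exact absurd h (Nat.not_lt_zero j)
  | succ m ih =>
    intro j hj
    rw [List.range_succ, List.map_append, List.sum_append]
    by_cases hjm : j = m
    · subst hjm
      have hz : (List.range j).map (fun k => if k = j then δ else 0) =
          (List.range j).map (fun _ => (0 : Int)) := by
        refine List.map_congr_left (fun a ha => ?_)
        rw [if_neg (by have := List.mem_range.mp ha; omega)]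
      rw [hz]; simp
    · rw [ih j (by omega)]
      simp only [List.map_cons, List.map_nil, List.sum_cons, List.sum_nil]
      rw [if_neg (fun h => hjm h.symm)]
      ring

lemma pyIdx_bkt (c : Char) (h1 : 39 ≤ c.toNat) (h2 : c.toNat ≤ 90) :
    PySem.List.pyIdx? 26 ((c.toNat : Int) - 65) = some (bkt c) := by
  unfold PySem.List.pyIdx? bkt
  split_ifs <;> first | (simp only [Option.some.injEq]; omega) | (exfalso; omega)

lemma pyGetD_bkt {α : Type} (xs : List α) (d : α) (c : Char) (hlen : xs.length = 26)
    (h1 : 39 ≤ c.toNat) (h2 : c.toNat ≤ 90) :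
    PySem.List.pyGetD xs ((c.toNat : Int) - 65) d = xs.getD (bkt c) d := by
  unfold PySem.List.pyGetD PySem.List.pyGet?
  rw [hlen, pyIdx_bkt c h1 h2]
  simp [List.getD_eq_getElem?_getD]

lemma pySetD_bkt {α : Type} (xs : List α) (v : α) (c : Char) (hlen : xs.length = 26)
    (h1 : 39 ≤ c.toNat) (h2 : c.toNat ≤ 90) :
    PySem.List.pySetD xs ((c.toNat : Int) - 65) v = xs.set (bkt c) v := by
  unfold PySem.List.pySetD PySem.List.pySet?
  rw [hlen, pyIdx_bkt c h1 h2]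
  simp

-- ============ A's first loop builds, per bucket k, [-1] ++ positions of bucket k ============
lemma build_spec (en : List (Int × Char)) :
    ∀ (mp : List (List Int)), mp.length = 26 →
    (∀ p ∈ en, 39 ≤ (p.2).toNat ∧ (p.2).toNat ≤ 90) →
    (en.foldl buildA mp).length = 26 ∧
    ∀ k : Nat, (en.foldl buildA mp).getD k [] = mp.getD k [] ++ poss k en := by
  induction en with
  | nil => intro mp h _; exact ⟨h, fun k => by simp [poss]⟩
  | cons p t ih =>
    intro mp hl hP
    have hp := hP p (List.mem_cons_self ..)
    have hj : bkt p.2 < 26 := bkt_lt _ hp.1 hp.2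
    have hstep : buildA mp p = mp.set (bkt p.2) (mp.getD (bkt p.2) [] ++ [p.1]) := by
      simp only [buildA]
      rw [pyGetD_bkt mp [] p.2 hl hp.1 hp.2, pySetD_bkt mp _ p.2 hl hp.1 hp.2]
    rw [List.foldl_cons, hstep]
    obtain ⟨il, ig⟩ := ih (mp.set (bkt p.2) (mp.getD (bkt p.2) [] ++ [p.1]))
      (by rw [List.length_set]; exact hl) (fun q hq => hP q (List.mem_cons_of_mem _ hq))
    refine ⟨il, fun k => ?_⟩
    rw [ig k, getD_set_eq _ _ _ _ _ (hl ▸ hj), poss_cons]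
    by_cases hkj : k = bkt p.2
    · subst hkj; rw [if_pos rfl, if_pos rfl]; simp
    · rw [if_neg hkj, if_neg (fun h => hkj h.symm)]

-- ============ B's main loop = the 26 independent per-letter loops pb ============
lemma bmain_spec (en : List (Int × Char)) :
    ∀ (last sec : List Int) (ans : Int), last.length = 26 → sec.length = 26 →
    (∀ p ∈ en, 39 ≤ (p.2).toNat ∧ (p.2).toNat ≤ 90) →
    (en.foldl stepB (last, sec, ans)).1.length = 26 ∧
    (en.foldl stepB (last, sec, ans)).2.1.length = 26 ∧
    (∀ k : Nat, k < 26 →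
      (en.foldl stepB (last, sec, ans)).1.getD k 0 =
        (pb (sec.getD k 0) (last.getD k 0) 0 (poss k en)).2.1 ∧
      (en.foldl stepB (last, sec, ans)).2.1.getD k 0 =
        (pb (sec.getD k 0) (last.getD k 0) 0 (poss k en)).1) ∧
    (en.foldl stepB (last, sec, ans)).2.2 =
      ans + ((List.range 26).map
        (fun k => (pb (sec.getD k 0) (last.getD k 0) 0 (poss k en)).2.2)).sum := by
  induction en with
  | nil =>
    intro last sec ans hl hs _
    refine ⟨hl, hs, fun k _ => by simp [pb, poss], ?_⟩
    simp [pb, poss]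
  | cons p t ih =>
    intro last sec ans hl hs hP
    have hp := hP p (List.mem_cons_self ..)
    have hj : bkt p.2 < 26 := bkt_lt _ hp.1 hp.2
    have hstep : stepB (last, sec, ans) p =
        (last.set (bkt p.2) p.1, sec.set (bkt p.2) (last.getD (bkt p.2) 0),
         ans + (last.getD (bkt p.2) 0 - sec.getD (bkt p.2) 0) *
               (p.1 - last.getD (bkt p.2) 0)) := by
      simp only [stepB]
      rw [pyGetD_bkt last 0 p.2 hl hp.1 hp.2, pyGetD_bkt sec 0 p.2 hs hp.1 hp.2,
          pySetD_bkt last p.1 p.2 hl hp.1 hp.2, pySetD_bkt sec _ p.2 hs hp.1 hp.2]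
    rw [List.foldl_cons, hstep]
    obtain ⟨ih1, ih2, ihc, iha⟩ := ih (last.set (bkt p.2) p.1)
      (sec.set (bkt p.2) (last.getD (bkt p.2) 0)) _
      (by simp [hl]) (by simp [hs]) (fun q hq => hP q (List.mem_cons_of_mem _ hq))
    refine ⟨ih1, ih2, ?_, ?_⟩
    · intro k hk
      obtain ⟨c1, c2⟩ := ihc k hk
      rw [c1, c2, getD_set_eq _ _ _ _ _ (show bkt p.2 < sec.length by omega),
          getD_set_eq _ _ _ _ _ (show bkt p.2 < last.length by omega), poss_cons]
      by_cases hkj : k = bkt p.2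
      · subst hkj
        rw [if_pos rfl, if_pos rfl, if_pos rfl]
        constructor
        · simp only [pb]
          exact (pb_snd1 _ _ _ _).symm
        · simp only [pb]
          exact (pb_fst _ _ _ _).symm
      · rw [if_neg hkj, if_neg hkj, if_neg (fun h => hkj h.symm)]
        exact ⟨rfl, rfl⟩
    · rw [iha]
      have hterm : ∀ k ∈ List.range 26,
          (pb (sec.getD k 0) (last.getD k 0) 0 (poss k (p :: t))).2.2 =
          (pb ((sec.set (bkt p.2) (last.getD (bkt p.2) 0)).getD k 0)
              ((last.set (bkt p.2) p.1).getD k 0) 0 (poss k t)).2.2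
            + (if k = bkt p.2 then
                 (last.getD (bkt p.2) 0 - sec.getD (bkt p.2) 0) *
                 (p.1 - last.getD (bkt p.2) 0) else 0) := by
        intro k _
        rw [poss_cons, getD_set_eq _ _ _ _ _ (show bkt p.2 < sec.length by omega),
            getD_set_eq _ _ _ _ _ (show bkt p.2 < last.length by omega)]
        by_cases hkj : k = bkt p.2
        · subst hkj
          rw [if_pos rfl, if_pos rfl, if_pos rfl, if_pos rfl]
          simp only [pb]
          rw [pb_snd2]
          ring
        · rw [if_neg (fun h => hkj h.symm), if_neg hkj, if_neg hkj, if_neg hkj]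
          ring
      rw [List.map_congr_left hterm, PySem.List.sum_map_add_int,
          sum_map_ite_single _ _ _ hj]
      ring

-- ============ A's inner indexed loop computes g ============
lemma pyRange_one_eq_map (L : Nat) :
    PySem.List.pyRange 1 ((L : Int) + 1) 1 = (List.range L).map (fun (k : Nat) => (k : Int) + 1) := by
  induction L with
  | zero => norm_num [PySem.List.pyRange_one_eq_nil]
  | succ m ih =>
    have h1 : ((m + 1 : Nat) : Int) + 1 = ((m : Int) + 1) + 1 := by push_cast; ring
    rw [h1, PySem.List.pyRange_one_succ_right (by omega), ih, List.range_succ, List.map_append]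
    simp

lemma sum_triples (l : List Int) : ∀ (a b : Int),
    ((List.range l.length).map (fun k =>
       ((a :: b :: l).getD (k + 1) 0 - (a :: b :: l).getD k 0) *
       ((a :: b :: l).getD (k + 2) 0 - (a :: b :: l).getD (k + 1) 0))).sum = g a b l := by
  induction l with
  | nil => intro a b; simp [g]
  | cons c t ih =>
    intro a b
    rw [List.length_cons, List.range_succ_eq_map, List.map_cons, List.sum_cons, List.map_map]
    have hcongr : ∀ x ∈ List.range t.length,
        ((fun k =>
            ((a :: b :: c :: t).getD (k + 1) 0 - (a :: b :: c :: t).getD k 0) *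
            ((a :: b :: c :: t).getD (k + 2) 0 - (a :: b :: c :: t).getD (k + 1) 0)) ∘ Nat.succ) x
        = (fun k =>
            ((b :: c :: t).getD (k + 1) 0 - (b :: c :: t).getD k 0) *
            ((b :: c :: t).getD (k + 2) 0 - (b :: c :: t).getD (k + 1) 0)) x := by
      intro x _
      simp only [Function.comp_apply, Nat.succ_eq_add_one]
      rw [show x + 1 + 2 = (x + 2) + 1 by omega]
      simp
    rw [List.map_congr_left hcongr, ih b c]
    simp [g]

lemma innerA_g (l : List Int) (a b ans : Int) : innerA (a :: b :: l) ans = ans + g a b l := by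
  have hlen : PySem.List.len (a :: b :: l) - 1 = (l.length : Int) + 1 := by
    simp [PySem.List.len_eq]
  simp only [innerA]
  rw [hlen, pyRange_one_eq_map]
  simp only [List.foldl_map]
  simp only [PySem.List.foldl_add]
  have hmap : ∀ x ∈ List.range l.length,
      (PySem.List.pyGetD (a :: b :: l) ((x : Int) + 1) 0 -
        PySem.List.pyGetD (a :: b :: l) ((x : Int) + 1 - 1) 0) *
      (PySem.List.pyGetD (a :: b :: l) ((x : Int) + 1 + 1) 0 -
        PySem.List.pyGetD (a :: b :: l) ((x : Int) + 1) 0)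
      = ((a :: b :: l).getD (x + 1) 0 - (a :: b :: l).getD x 0) *
        ((a :: b :: l).getD (x + 2) 0 - (a :: b :: l).getD (x + 1) 0) := by
    intro x _
    have e1 : (x : Int) + 1 - 1 = ((x : Nat) : Int) := by ring
    have e2 : (x : Int) + 1 = (((x + 1 : Nat)) : Int) := by push_cast; ring
    have e3 : (x : Int) + 1 + 1 = (((x + 2 : Nat)) : Int) := by push_cast; ring
    rw [e1, e3, e2]
    simp only [PySem.List.pyGetD_natCast]
  rw [List.map_congr_left hmap, sum_triples l a b]

lemma innerA_shift (q : List Int) (ans : Int) : innerA q ans = ans + innerA q 0 := by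
  simp only [innerA, PySem.List.foldl_add]
  ring

-- both programs' per-letter value
lemma perLetter (n : Int) (ps : List Int) :
    innerA (([-1] ++ ps) ++ [n]) 0 = contrib n ps := by
  cases ps with
  | nil =>
    norm_num [innerA, contrib, pbk, pb, PySem.List.len_eq, PySem.List.pyRange_one_eq_nil]
  | cons i t =>
    have h : (([-1] ++ (i :: t)) ++ [n] : List Int) = -1 :: i :: (t ++ [n]) := by simp
    rw [h, innerA_g]
    unfold contrib pbk
    rw [pb_g (i :: t) (-1) (-1) 0 n]
    simp only [List.cons_append, g]
    ring

lemma h26range : PySem.List.pyRange 0 26 1 = (List.range 26).map (fun (k : Nat) => (k : Int)) := by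
  decide

-- A's outer loop over distinct nonnegative indexes: per-index contributions just add up
lemma outerA_spec (n : Int) : ∀ (ks : List Nat) (mp : List (List Int)) (ans : Int),
    ks.Nodup →
    ((ks.map (fun (k : Nat) => (k : Int))).foldl (outerA n) (mp, ans)).2
      = ans + (ks.map (fun k => innerA (mp.getD k [] ++ [n]) 0)).sum := by
  intro ks
  induction ks with
  | nil => intro mp ans _; simp
  | cons k t ih =>
    intro mp ans hnd
    simp only [List.map_cons, List.foldl_cons]
    have hstep : outerA n (mp, ans) (k : Int) =
        (mp.set k (mp.getD k [] ++ [n]), innerA (mp.getD k [] ++ [n]) ans) := by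
      simp [outerA]
    rw [hstep, ih _ _ (List.nodup_cons.mp hnd).2]
    have hset : ∀ k' ∈ t, (mp.set k (mp.getD k [] ++ [n])).getD k' [] = mp.getD k' [] := by
      intro k' hk'
      have hne : k ≠ k' := fun h => (List.nodup_cons.mp hnd).1 (h ▸ hk')
      simp [List.getD_eq_getElem?_getD, List.getElem?_set_ne hne]
    rw [List.map_congr_left (fun a ha => by rw [hset a ha])]
    rw [innerA_shift, List.sum_cons]
    ring

-- B's flush loop = sum of the per-letter flush terms
lemma flush_spec (n : Int) (st : List Int × List Int × Int) (a : Int) (m : Nat) :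
    (((List.range m).map (fun (k : Nat) => (k : Int))).foldl (flushB n st) a)
      = a + ((List.range m).map
          (fun k => (st.1.getD k 0 - st.2.1.getD k 0) * (n - st.1.getD k 0))).sum := by
  have e : flushB n st = fun (acc : Int) (c : Int) =>
      acc + (PySem.List.pyGetD st.1 c 0 - PySem.List.pyGetD st.2.1 c 0) *
            (n - PySem.List.pyGetD st.1 c 0) := rfl
  rw [e]
  simp only [List.foldl_map]
  simp only [PySem.List.foldl_add]
  congr 1
  refine congrArg List.sum (List.map_congr_left (fun k _ => ?_))
  simp

lemma pre_en (s : String) (hPre : Pre_uniqueLetterString s) :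
    ∀ p ∈ PySem.List.enumerate s.toList, 39 ≤ (p.2).toNat ∧ (p.2).toNat ≤ 90 := by
  intro p hp
  have hmem : p.2 ∈ s.toList := by
    rw [← PySem.List.map_snd_enumerate s.toList 0]
    exact List.mem_map_of_mem hp
  have h := List.all_eq_true.mp hPre p.2 hmem
  simpa using h

lemma A_val (s : String) (hPre : Pre_uniqueLetterString s) :
    uniqueLetterString s =
      ((List.range 26).map
        (fun k => contrib (PySem.Str.len s) (poss k (PySem.List.enumerate s.toList)))).sum := by
  obtain ⟨hblen, hbget⟩ :=
    build_spec (PySem.List.enumerate s.toList) (List.replicate 26 [-1]) (by simp) (pre_en s hPre)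
  simp only [uniqueLetterString]
  rw [h26range, outerA_spec (PySem.Str.len s) (List.range 26) _ 0 List.nodup_range]
  have hpt : ∀ k ∈ List.range 26,
      innerA ((List.foldl buildA (List.replicate 26 [-1])
          (PySem.List.enumerate s.toList)).getD k [] ++ [PySem.Str.len s]) 0
      = contrib (PySem.Str.len s) (poss k (PySem.List.enumerate s.toList)) := by
    intro k hk
    rw [hbget k, List.getD_replicate _ (List.mem_range.mp hk)]
    exact perLetter (PySem.Str.len s) (poss k (PySem.List.enumerate s.toList))
  rw [List.map_congr_left hpt]
  simp

lemma B_val (s : String) (hPre : Pre_uniqueLetterString s) :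
    uniqueLetterString_alt s =
      ((List.range 26).map
        (fun k => contrib (PySem.Str.len s) (poss k (PySem.List.enumerate s.toList)))).sum := by
  obtain ⟨h1, h2, hc, ha⟩ :=
    bmain_spec (PySem.List.enumerate s.toList) (List.replicate 26 (-1)) (List.replicate 26 (-1)) 0
      (by simp) (by simp) (pre_en s hPre)
  simp only [uniqueLetterString_alt]
  rw [h26range, flush_spec, ha, zero_add, ← PySem.List.sum_map_add_int]
  refine congrArg List.sum (List.map_congr_left (fun k hk => ?_))
  have hk26 : k < 26 := List.mem_range.mp hk
  obtain ⟨e1, e2⟩ := hc k hk26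
  rw [e1, e2]
  simp only [List.getD_replicate _ hk26]
  unfold contrib pbk
  ring

-- ===== VERDICT (by name: the statement is the Claim_ definition above) =====
theorem uniqueLetterString_spec : Claim_equal_uniqueLetterString := by
  intro s _ hPre
  unfold Spec_uniqueLetterString
  rw [A_val s hPre, B_val s hPre]
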